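-- pv_equiv track=rewrite | github.com/andrius-learns-things/studies | experiments/1/app/code/experiments/single_entity.py | _get_name_from_num
-- ===== SOURCE A (Python) =====
-- def _get_name_from_num(num):
--
--     if num == 0:
--         return "A"
--
--     txt = ""
--     num_to_divide = num
--
--     while num_to_divide > 0:
--         digit = num_to_divide % 10
--         num_to_divide = num_to_divide // 10
--         txt = chr(65 + digit) + txt
--
--     return txt
-- ===== SOURCE B (Python) =====
-- def _get_name_from_num(num):
--     return "".join(chr(65 + int(ch)) for ch in str(num))
-- ===== Notes on version B (the rewrite author's own statement) =====
-- stated objective: idiomatic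
-- what changed: Replaces A's mod-10/floor-divide reversed-prepend while loop and its special zero branch by a single forward map over str(num), converting each decimal digit character to its letter with chr(65 + int(ch)).
-- outside the precondition, e.g. on _get_name_from_num(-5): A returns '', B raises ValueError
import Mathlib
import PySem

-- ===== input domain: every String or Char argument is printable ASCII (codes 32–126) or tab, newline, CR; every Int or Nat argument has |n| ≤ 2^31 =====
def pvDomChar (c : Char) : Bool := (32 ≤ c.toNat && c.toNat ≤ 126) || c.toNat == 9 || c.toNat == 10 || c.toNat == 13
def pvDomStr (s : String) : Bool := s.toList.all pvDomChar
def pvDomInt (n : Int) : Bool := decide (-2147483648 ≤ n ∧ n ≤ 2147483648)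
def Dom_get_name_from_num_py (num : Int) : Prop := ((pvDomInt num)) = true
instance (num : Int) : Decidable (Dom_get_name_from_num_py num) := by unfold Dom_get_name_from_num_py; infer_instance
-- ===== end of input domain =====

-- B replaces A's mod/divide reversed-prepend loop by a forward map over str(num); objective: idiomatic.

-- ===== PORT A =====
-- the while loop: txt is the accumulated string (as a list of chars), prepended to at each step
def pvALoop (n : Int) (txt : List Char) : List Char :=
  if 0 < n then
    pvALoop (PySem.Int.floordiv n 10) (Char.ofNat (65 + (PySem.Int.mod n 10)).toNat :: txt)
  else txt
termination_by n.toNat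
decreasing_by
  rename_i h
  rw [PySem.Int.floordiv_eq_ediv_of_pos (by norm_num)]
  omega

def get_name_from_num_py (num : Int) : String :=
  if num == 0 then "A" else String.mk (pvALoop num [])

-- ===== PORT B =====
-- "".join(chr(65 + int(ch)) for ch in str(num)); int(ch) is PySem.Int.ofChars? [ch]
-- (getD 0 stands for the raising lookup: under Pre_ every ch is a digit, so it is always `some`)
def get_name_from_num_py_alt (num : Int) : String :=
  String.mk ((PySem.Int.toStr num).toList.map
    (fun ch => Char.ofNat (65 + ((PySem.Int.ofChars? [ch]).getD 0).toNat)))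

-- ===== PRECONDITION & SPEC =====
-- Pre_ excludes negative num, on which A's untaken loop returns "" while B itself raises
-- ValueError at int('-'); A returns there, so this is the defensible-corner/raising-B form of Pre_.
def Pre_get_name_from_num_py (num : Int) : Prop := 0 ≤ num
instance (num : Int) : Decidable (Pre_get_name_from_num_py num) := by unfold Pre_get_name_from_num_py; infer_instance
def pvWitness_get_name_from_num_py : Int := 12

def Spec_get_name_from_num_py (num : Int) (out : String) : Prop := out = get_name_from_num_py_alt num
instance (num : Int) (out : String) : Decidable (Spec_get_name_from_num_py num out) := by unfold Spec_get_name_from_num_py; infer_instance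

-- ===== CLAIM (what is proved, stated in full; the proofs are below) =====
def Claim_equal_get_name_from_num_py : Prop := ∀ (num : Int), Dom_get_name_from_num_py num → Pre_get_name_from_num_py num → Spec_get_name_from_num_py num (get_name_from_num_py num)

-- ===== LEMMAS AND PROOFS =====

-- B's per-character mapping
def pvG (ch : Char) : Char := Char.ofNat (65 + ((PySem.Int.ofChars? [ch]).getD 0).toNat)

lemma pvG_digitChar (d : Nat) (hd : d < 10) : pvG (Nat.digitChar d) = Char.ofNat (65 + d) := by
  interval_cases d <;> decide

lemma toDigitsCore_acc (f n : Nat) (acc : List Char) :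
    Nat.toDigitsCore 10 f n acc = Nat.toDigitsCore 10 f n [] ++ acc := by
  induction f generalizing n acc with
  | zero => simp [Nat.toDigitsCore]
  | succ f ih =>
    simp only [Nat.toDigitsCore]
    split_ifs with h
    · simp
    · rw [ih (n / 10) (Nat.digitChar (n % 10) :: acc),
        ih (n / 10) [Nat.digitChar (n % 10)]]
      simp

lemma toDigitsCore_fuel (f f' n : Nat) (hf : n < f) (hf' : n < f') :
    Nat.toDigitsCore 10 f n [] = Nat.toDigitsCore 10 f' n [] := by
  induction n using Nat.strong_induction_on generalizing f f' with
  | _ n ih =>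
    match f, f' with
    | f + 1, f' + 1 =>
      simp only [Nat.toDigitsCore]
      split_ifs with h
      · rfl
      · have hlt : n / 10 < n := Nat.div_lt_self (by omega) (by omega)
        rw [toDigitsCore_acc f, toDigitsCore_acc f',
          ih (n / 10) hlt f f' (by omega) (by omega)]

lemma toDigits10_small (n : Nat) (h : n < 10) : Nat.toDigits 10 n = [Nat.digitChar n] := by
  simp [Nat.toDigits, Nat.toDigitsCore, Nat.div_eq_of_lt h, Nat.mod_eq_of_lt h]

lemma toDigits10_step (n : Nat) (h : 10 ≤ n) :
    Nat.toDigits 10 n = Nat.toDigits 10 (n / 10) ++ [Nat.digitChar (n % 10)] := by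
  have hne : ¬ n / 10 = 0 := by omega
  show Nat.toDigitsCore 10 (n + 1) n [] = _
  simp only [Nat.toDigitsCore, hne, if_false]
  rw [toDigitsCore_acc]
  congr 1
  exact toDigitsCore_fuel n (n / 10 + 1) (n / 10)
    (Nat.div_lt_self (by omega) (by omega)) (Nat.lt_succ_self _)

lemma pvALoop_eq (m : Nat) (hm : 0 < m) (acc : List Char) :
    pvALoop (m : Int) acc = (Nat.toDigits 10 m).map pvG ++ acc := by
  induction m using Nat.strong_induction_on generalizing acc with
  | _ m ih =>
    rw [pvALoop]
    have hpos : (0 : Int) < (m : Int) := by exact_mod_cast hm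
    rw [if_pos hpos]
    have hdiv : PySem.Int.floordiv (m : Int) 10 = ((m / 10 : Nat) : Int) := by
      rw [PySem.Int.floordiv_eq_ediv_of_pos (by norm_num)]; omega
    have hmod : (65 + PySem.Int.mod (m : Int) 10).toNat = 65 + m % 10 := by
      rw [PySem.Int.mod_eq_emod_of_pos (by norm_num)]; omega
    rw [hdiv, hmod]
    have hc : Char.ofNat (65 + m % 10) = pvG (Nat.digitChar (m % 10)) :=
      (pvG_digitChar (m % 10) (Nat.mod_lt _ (by omega))).symm
    by_cases hsmall : m < 10
    · have h0 : m / 10 = 0 := Nat.div_eq_of_lt hsmall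
      rw [h0, pvALoop, if_neg (by simp), toDigits10_small m hsmall,
        Nat.mod_eq_of_lt hsmall] at *
      simp [hc]
    · have h10 : 10 ≤ m := by omega
      have hdp : 0 < m / 10 := by omega
      rw [ih (m / 10) (Nat.div_lt_self hm (by omega)) hdp,
        toDigits10_step m h10]
      simp [hc]

lemma alt_eq (num : Int) (h : 0 ≤ num) :
    get_name_from_num_py_alt num = String.mk ((Nat.toDigits 10 num.toNat).map pvG) := by
  unfold get_name_from_num_py_alt
  rw [PySem.Int.toList_toStr]
  unfold PySem.Int.toChars
  rw [if_neg (by omega)]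
  rfl

-- ===== VERDICT (by name: the statement is the Claim_ definition above) =====
theorem get_name_from_num_py_spec : Claim_equal_get_name_from_num_py := by
  intro num _ hpre
  unfold Spec_get_name_from_num_py get_name_from_num_py
  by_cases h0 : num = 0
  · subst h0; decide
  · have hpos : 0 < num := lt_of_le_of_ne hpre (Ne.symm h0)
    rw [if_neg (by simpa using h0), alt_eq num hpre]
    have : num = ((num.toNat : Nat) : Int) := by omega
    rw [this, pvALoop_eq num.toNat (by omega) []]
    have hx : (max num 0).toNat = num.toNat := by omega
    simp [hx]
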